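-- pv_equiv track=rewrite | github.com/google/zetasql | zetasql/parser/gen_extra_files.py | GenerateParseTreeVisitor
-- ===== SOURCE A (Python) =====
-- import textwrap
--
-- def GenerateParseTreeVisitor(concrete_classes):
--   """Generates parse_tree_visitor.h contents containing ParseTreeVisitor class.
--
--   Args:
--     concrete_classes: a list of classes for which to generate visit methods
--
--   Yields:
--     A string part of the output code.
--   """
--   yield textwrap.dedent('''\
--       #ifndef STORAGE_ZETASQL_PARSER_PARSE_TREE_VISITOR_H_
--       #define STORAGE_ZETASQL_PARSER_PARSE_TREE_VISITOR_H_
--       #include "zetasql/parser/parse_tree.h"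
--       #include "zetasql/parser/visit_result.h"
--
--       namespace zetasql {
--       class ParseTreeVisitor {
--        public:
--         virtual ~ParseTreeVisitor() {}
--         virtual void visit(const ASTNode *node, void* data) = 0;
--       ''')
--   for cls in concrete_classes:
--     yield ('  virtual void visit{0}(const {0}* node, void* data) = 0;\n\n'
--            .format(cls))
--   yield textwrap.dedent('''\
--       };
--
--       class DefaultParseTreeVisitor : public ParseTreeVisitor {
--        public:
--         virtual void defaultVisit(const ASTNode* node, void* data) = 0;
--         void visit(const ASTNode* node, void* data) override {
--           defaultVisit(node, data);
--         }
--       ''')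
--   for cls in concrete_classes:
--     yield (
--         '  void visit{0}(const {0}* node, void* data) override {{\n' +  #
--         '    defaultVisit(node, data);\n' +  #
--         '  }}\n' +  #
--         '\n').format(cls)
--   yield textwrap.dedent('''\
--       };
--
--       class NonRecursiveParseTreeVisitor {
--        public:
--         virtual ~NonRecursiveParseTreeVisitor() {}
--         virtual absl::StatusOr<VisitResult> defaultVisit(const ASTNode* node) = 0;
--         absl::StatusOr<VisitResult> visit(const ASTNode* node) {
--           return defaultVisit(node);
--         }
--       ''')
--   for cls in concrete_classes:
--     yield (('  virtual absl::StatusOr<VisitResult> visit{0}(const {0}* node) ' +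
--             '{{return defaultVisit(node);}};\n\n').format(cls))
--   yield textwrap.dedent('''\
--       };
--       }  // namespace zetasql
--       #endif  // STORAGE_ZETASQL_PARSER_PARSE_TREE_VISITOR_H_
--       ''')
-- ===== SOURCE B (Python) =====
-- # B: ONE pass over concrete_classes that builds the per-class lines of all three
-- # visitor classes simultaneously (three accumulators), then emits the assembled
-- # chunk sequence; A instead makes three separate passes interleaved with dedents.
--
-- _H1 = ('#ifndef STORAGE_ZETASQL_PARSER_PARSE_TREE_VISITOR_H_\n'
--        '#define STORAGE_ZETASQL_PARSER_PARSE_TREE_VISITOR_H_\n'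
--        '#include "zetasql/parser/parse_tree.h"\n'
--        '#include "zetasql/parser/visit_result.h"\n'
--        '\n'
--        'namespace zetasql {\n'
--        'class ParseTreeVisitor {\n'
--        ' public:\n'
--        '  virtual ~ParseTreeVisitor() {}\n'
--        '  virtual void visit(const ASTNode *node, void* data) = 0;\n')
--
-- _H2 = ('};\n'
--        '\n'
--        'class DefaultParseTreeVisitor : public ParseTreeVisitor {\n'
--        ' public:\n'
--        '  virtual void defaultVisit(const ASTNode* node, void* data) = 0;\n'
--        '  void visit(const ASTNode* node, void* data) override {\n'
--        '    defaultVisit(node, data);\n'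
--        '  }\n')
--
-- _H3 = ('};\n'
--        '\n'
--        'class NonRecursiveParseTreeVisitor {\n'
--        ' public:\n'
--        '  virtual ~NonRecursiveParseTreeVisitor() {}\n'
--        '  virtual absl::StatusOr<VisitResult> defaultVisit(const ASTNode* node) = 0;\n'
--        '  absl::StatusOr<VisitResult> visit(const ASTNode* node) {\n'
--        '    return defaultVisit(node);\n'
--        '  }\n')
--
-- _T = ('};\n'
--       '}  // namespace zetasql\n'
--       '#endif  // STORAGE_ZETASQL_PARSER_PARSE_TREE_VISITOR_H_\n')
--
--
-- def GenerateParseTreeVisitor(concrete_classes):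
--   sec1, sec2, sec3 = [], [], []
--   for cls in concrete_classes:
--     sec1.append(f'  virtual void visit{cls}(const {cls}* node, void* data) = 0;\n\n')
--     sec2.append(f'  void visit{cls}(const {cls}* node, void* data) override {{\n'
--                 f'    defaultVisit(node, data);\n'
--                 f'  }}\n\n')
--     sec3.append(f'  virtual absl::StatusOr<VisitResult> visit{cls}(const {cls}* node) '
--                 f'{{return defaultVisit(node);}};\n\n')
--   yield from [_H1] + sec1 + [_H2] + sec2 + [_H3] + sec3 + [_T]
-- ===== Notes on version B (the rewrite author's own statement) =====
-- stated objective: alternative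
-- what changed: A makes three separate passes over concrete_classes, each interleaved with a textwrap.dedent'ed header and its own format template; B makes ONE pass that builds the per-class lines of all three visitor classes simultaneously into three accumulators, then assembles and emits the whole chunk sequence with precomputed header constants.
import Mathlib
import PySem

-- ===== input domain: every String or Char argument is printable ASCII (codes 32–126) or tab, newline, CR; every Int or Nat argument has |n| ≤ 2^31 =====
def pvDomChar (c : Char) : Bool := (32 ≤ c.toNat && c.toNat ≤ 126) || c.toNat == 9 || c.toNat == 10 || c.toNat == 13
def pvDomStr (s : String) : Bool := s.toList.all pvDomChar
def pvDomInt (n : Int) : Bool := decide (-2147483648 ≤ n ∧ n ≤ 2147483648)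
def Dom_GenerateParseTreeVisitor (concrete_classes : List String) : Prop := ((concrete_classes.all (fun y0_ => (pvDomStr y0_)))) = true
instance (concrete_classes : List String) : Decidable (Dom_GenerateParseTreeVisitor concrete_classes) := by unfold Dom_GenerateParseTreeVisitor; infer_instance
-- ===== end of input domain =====

-- B replaces A's three separate per-class passes by ONE pass that accumulates
-- the per-class lines of all three visitor classes simultaneously.

-- ===== PORT A =====
-- textwrap.dedent of an already-dedented literal is the literal itself (exact).
-- '...{0}...'.format(cls) is ported by hand as the corresponding string
-- concatenation with '{{'/'}}' unescaped to single braces (exact here: the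
-- templates contain no other brace/format constructs). Each yield-loop becomes
-- a map appended in order, matching the yielded chunk sequence.
def GenerateParseTreeVisitor (concrete_classes : List String) : List String :=
  ["#ifndef STORAGE_ZETASQL_PARSER_PARSE_TREE_VISITOR_H_\n#define STORAGE_ZETASQL_PARSER_PARSE_TREE_VISITOR_H_\n#include \"zetasql/parser/parse_tree.h\"\n#include \"zetasql/parser/visit_result.h\"\n\nnamespace zetasql {\nclass ParseTreeVisitor {\n public:\n  virtual ~ParseTreeVisitor() {}\n  virtual void visit(const ASTNode *node, void* data) = 0;\n"]
  ++ concrete_classes.map (fun cls =>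
      "  virtual void visit" ++ cls ++ "(const " ++ cls ++ "* node, void* data) = 0;\n\n")
  ++ ["};\n\nclass DefaultParseTreeVisitor : public ParseTreeVisitor {\n public:\n  virtual void defaultVisit(const ASTNode* node, void* data) = 0;\n  void visit(const ASTNode* node, void* data) override {\n    defaultVisit(node, data);\n  }\n"]
  ++ concrete_classes.map (fun cls =>
      "  void visit" ++ cls ++ "(const " ++ cls ++ "* node, void* data) override {\n" ++
      "    defaultVisit(node, data);\n" ++
      "  }\n\n")
  ++ ["};\n\nclass NonRecursiveParseTreeVisitor {\n public:\n  virtual ~NonRecursiveParseTreeVisitor() {}\n  virtual absl::StatusOr<VisitResult> defaultVisit(const ASTNode* node) = 0;\n  absl::StatusOr<VisitResult> visit(const ASTNode* node) {\n    return defaultVisit(node);\n  }\n"]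
  ++ concrete_classes.map (fun cls =>
      "  virtual absl::StatusOr<VisitResult> visit" ++ cls ++ "(const " ++ cls ++ "* node) " ++
      "{return defaultVisit(node);};\n\n")
  ++ ["};\n}  // namespace zetasql\n#endif  // STORAGE_ZETASQL_PARSER_PARSE_TREE_VISITOR_H_\n"]

-- ===== PORT B =====
def pvH1 : String := "#ifndef STORAGE_ZETASQL_PARSER_PARSE_TREE_VISITOR_H_\n#define STORAGE_ZETASQL_PARSER_PARSE_TREE_VISITOR_H_\n#include \"zetasql/parser/parse_tree.h\"\n#include \"zetasql/parser/visit_result.h\"\n\nnamespace zetasql {\nclass ParseTreeVisitor {\n public:\n  virtual ~ParseTreeVisitor() {}\n  virtual void visit(const ASTNode *node, void* data) = 0;\n"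
def pvH2 : String := "};\n\nclass DefaultParseTreeVisitor : public ParseTreeVisitor {\n public:\n  virtual void defaultVisit(const ASTNode* node, void* data) = 0;\n  void visit(const ASTNode* node, void* data) override {\n    defaultVisit(node, data);\n  }\n"
def pvH3 : String := "};\n\nclass NonRecursiveParseTreeVisitor {\n public:\n  virtual ~NonRecursiveParseTreeVisitor() {}\n  virtual absl::StatusOr<VisitResult> defaultVisit(const ASTNode* node) = 0;\n  absl::StatusOr<VisitResult> visit(const ASTNode* node) {\n    return defaultVisit(node);\n  }\n"
def pvT : String := "};\n}  // namespace zetasql\n#endif  // STORAGE_ZETASQL_PARSER_PARSE_TREE_VISITOR_H_\n"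

-- the single loop of Source B: one foldl over the classes appending, per class,
-- one line to each of the three section accumulators (exact transcription).
def pvAccum (concrete_classes : List String) :
    List String × List String × List String :=
  concrete_classes.foldl
    (fun st cls =>
      (st.1 ++ ["  virtual void visit" ++ cls ++ "(const " ++ cls ++ "* node, void* data) = 0;\n\n"],
       st.2.1 ++ ["  void visit" ++ cls ++ "(const " ++ cls ++ "* node, void* data) override {\n" ++
                  "    defaultVisit(node, data);\n" ++ "  }\n\n"],
       st.2.2 ++ ["  virtual absl::StatusOr<VisitResult> visit" ++ cls ++ "(const " ++ cls ++ "* node) " ++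
                  "{return defaultVisit(node);};\n\n"]))
    ([], [], [])

def GenerateParseTreeVisitor_alt (concrete_classes : List String) : List String :=
  let st := pvAccum concrete_classes
  [pvH1] ++ st.1 ++ [pvH2] ++ st.2.1 ++ [pvH3] ++ st.2.2 ++ [pvT]

-- ===== PRECONDITION & SPEC =====
def Spec_GenerateParseTreeVisitor (concrete_classes : List String) (out : List String) : Prop := out = GenerateParseTreeVisitor_alt concrete_classes
instance (concrete_classes : List String) (out : List String) : Decidable (Spec_GenerateParseTreeVisitor concrete_classes out) := by unfold Spec_GenerateParseTreeVisitor; infer_instance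

-- ===== CLAIM =====
def Claim_equal_GenerateParseTreeVisitor : Prop := ∀ (concrete_classes : List String), Dom_GenerateParseTreeVisitor concrete_classes → Spec_GenerateParseTreeVisitor concrete_classes (GenerateParseTreeVisitor concrete_classes)

-- ===== LEMMAS AND PROOFS =====
-- the fold with three appending accumulators produces the three maps
theorem pvAccum_eq (cs : List String) (a b c : List String) :
    cs.foldl
      (fun st cls =>
        (st.1 ++ ["  virtual void visit" ++ cls ++ "(const " ++ cls ++ "* node, void* data) = 0;\n\n"],
         st.2.1 ++ ["  void visit" ++ cls ++ "(const " ++ cls ++ "* node, void* data) override {\n" ++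
                    "    defaultVisit(node, data);\n" ++ "  }\n\n"],
         st.2.2 ++ ["  virtual absl::StatusOr<VisitResult> visit" ++ cls ++ "(const " ++ cls ++ "* node) " ++
                    "{return defaultVisit(node);};\n\n"]))
      (a, b, c)
    = (a ++ cs.map (fun cls => "  virtual void visit" ++ cls ++ "(const " ++ cls ++ "* node, void* data) = 0;\n\n"),
       b ++ cs.map (fun cls => "  void visit" ++ cls ++ "(const " ++ cls ++ "* node, void* data) override {\n" ++
                    "    defaultVisit(node, data);\n" ++ "  }\n\n"),
       c ++ cs.map (fun cls => "  virtual absl::StatusOr<VisitResult> visit" ++ cls ++ "(const " ++ cls ++ "* node) " ++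
                    "{return defaultVisit(node);};\n\n")) := by
  induction cs generalizing a b c with
  | nil => simp
  | cons x xs ih => simp [List.foldl_cons, ih, List.append_assoc]

-- ===== VERDICT =====
theorem GenerateParseTreeVisitor_spec : Claim_equal_GenerateParseTreeVisitor := by
  intro cs _
  show GenerateParseTreeVisitor cs = GenerateParseTreeVisitor_alt cs
  simp [GenerateParseTreeVisitor, GenerateParseTreeVisitor_alt, pvAccum,
    pvAccum_eq, pvH1, pvH2, pvH3, pvT, List.append_assoc]
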